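-- pv_equiv track=rewrite | github.com/brazilian-code/Resume_Parsing | annotate.py | createNormalBounds
-- ===== SOURCE A (Python) =====
-- def createNormalBounds(box):
--     new_bounds = []
--     last_section = 'Personal Info'
--     for x in box:
--         if len(new_bounds)==0:
--             new_bounds.append(([[0, x[0][0][1]-10], [1700,x[0][0][1]-10], [1700, 0], [0,0]], last_section))
--         elif len(new_bounds)==1:
--             new_bounds.append(([[0,new_bounds[-1][0][0][1]+10],[1700,new_bounds[-1][0][0][1]+10],[1700,x[0][0][1]-10],[0,x[0][0][1]-10]], last_section))
--         else:
--             new_bounds.append(([[0,new_bounds[-1][0][3][1]+10],[1700,new_bounds[-1][0][3][1]+10],[1700,x[0][0][1]-10],[0,x[0][0][1]-10]],last_section))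
--         last_section = x[1].lower()
--     new_bounds[-1][0][3][1]=2200
--     new_bounds[-1][0][2][1]=2200
--     return new_bounds
-- ===== SOURCE B (Python) =====
-- def createNormalBounds(box):
--     tops = [b[0][0][1] for b in box]
--     labels = ['Personal Info'] + [b[1].lower() for b in box[:-1]]
--     y_top = [tops[0] - 10] + tops[:-1]
--     y_bot = ([0] + [t - 10 for t in tops[1:]])[:-1] + [2200]
--     return [([[0, a], [1700, a], [1700, b], [0, b]], s)
--             for a, b, s in zip(y_top, y_bot, labels)]
-- ===== Notes on version B (the rewrite author's own statement) =====
-- stated objective: simpler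
-- what changed: Replaces A's branch-on-length loop that reads coordinates back out of the list it is building (plus the final in-place 2200 patch) by three shifted parallel lists (tops, previous tops, bottoms ending in 2200) zipped directly into the rows.
import Mathlib
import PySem

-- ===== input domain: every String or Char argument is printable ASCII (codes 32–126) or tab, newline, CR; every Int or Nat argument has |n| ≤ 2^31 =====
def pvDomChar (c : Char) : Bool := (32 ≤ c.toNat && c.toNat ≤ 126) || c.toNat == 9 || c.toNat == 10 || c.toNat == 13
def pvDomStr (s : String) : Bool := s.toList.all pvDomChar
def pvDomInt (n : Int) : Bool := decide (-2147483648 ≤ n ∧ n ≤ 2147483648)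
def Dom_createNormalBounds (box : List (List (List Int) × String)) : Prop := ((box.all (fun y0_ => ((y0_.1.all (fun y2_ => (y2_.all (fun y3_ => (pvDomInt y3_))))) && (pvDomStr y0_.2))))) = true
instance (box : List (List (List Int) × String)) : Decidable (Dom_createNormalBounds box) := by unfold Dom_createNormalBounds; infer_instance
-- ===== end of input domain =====

-- B replaces A's branch-on-length loop that reads back into the built list by three shifted
-- parallel lists (tops, previous tops, bottoms with the 2200 end) zipped into rows (objective:
-- simpler decomposition, same cost).

-- shared helpers: x[0][0][1] (exact for in-range nonnegative indices, which Pre_ guarantees)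
-- and the rectangle literal [[0,a],[1700,a],[1700,b],[0,b]]
def pvTop (x : List (List Int) × String) : Int := (x.1.headI).getD 1 0
def pvRow (a b : Int) : List (List Int) := [[0, a], [1700, a], [1700, b], [0, b]]

-- ===== PORT A =====
-- one loop step of A; new_bounds[-1][...] read via getLast? (always in range inside Pre_)
def pvStepA (st : List (List (List Int) × String) × String) (x : List (List Int) × String) :
    List (List (List Int) × String) × String :=
  let nb := st.1
  let ls := st.2
  let nb' :=
    if nb.length = 0 then
      nb ++ [(pvRow (pvTop x - 10) 0, ls)]
    else if nb.length = 1 then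
      let v := (((nb.getLast?.getD ([], "")).1.getD 0 []).getD 1 0) + 10
      nb ++ [(pvRow v (pvTop x - 10), ls)]
    else
      let v := (((nb.getLast?.getD ([], "")).1.getD 3 []).getD 1 0) + 10
      nb ++ [(pvRow v (pvTop x - 10), ls)]
  (nb', PySem.Str.lower x.2)

-- new_bounds[-1][0][3][1] = 2200; new_bounds[-1][0][2][1] = 2200 (IndexError on [] → outside Pre_)
def pvPatchA (l : List (List (List Int) × String)) : List (List (List Int) × String) :=
  match l.getLast? with
  | none => l
  | some e => l.dropLast ++ [((e.1.modify 3 (fun p => p.set 1 2200)).modify 2 (fun p => p.set 1 2200), e.2)]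

def createNormalBounds (box : List (List (List Int) × String)) : List (List (List Int) × String) :=
  pvPatchA (box.foldl pvStepA ([], "Personal Info")).1

-- ===== PORT B =====
def createNormalBounds_alt (box : List (List (List Int) × String)) : List (List (List Int) × String) :=
  let tops := box.map pvTop
  let labels := "Personal Info" :: box.dropLast.map (fun b => PySem.Str.lower b.2)
  let yTop := (tops.headI - 10) :: tops.dropLast
  let yBot := (0 :: tops.tail.map (fun t => t - 10)).dropLast ++ [2200]
  ((yTop.zip yBot).zip labels).map (fun p => (pvRow p.1.1 p.1.2, p.2))

-- ===== PRECONDITION & SPEC =====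
-- Pre_ excludes exactly the inputs where Python A raises IndexError: the empty list
-- (new_bounds[-1] on []) and elements whose x[0][0][1] does not exist.
def Pre_createNormalBounds (box : List (List (List Int) × String)) : Prop :=
  box ≠ [] ∧ ∀ x ∈ box, x.1 ≠ [] ∧ 2 ≤ (x.1.headI).length
instance (box : List (List (List Int) × String)) : Decidable (Pre_createNormalBounds box) := by
  unfold Pre_createNormalBounds; infer_instance

def pvWitness_createNormalBounds : (List (List (List Int) × String)) := [([[5, 50]], "Skills")]

def Spec_createNormalBounds (box : List (List (List Int) × String)) (out : List (List (List Int) × String)) : Prop := out = createNormalBounds_alt box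
instance (box : List (List (List Int) × String)) (out : List (List (List Int) × String)) : Decidable (Spec_createNormalBounds box out) := by unfold Spec_createNormalBounds; infer_instance

-- ===== CLAIM (what is proved, stated in full; the proofs are below) =====
def Claim_equal_createNormalBounds : Prop := ∀ (box : List (List (List Int) × String)), Dom_createNormalBounds box → Pre_createNormalBounds box → Spec_createNormalBounds box (createNormalBounds box)

-- ===== LEMMAS AND PROOFS =====

-- the rows A's loop appends after the first one, given the previous top p and pending label s
def pvTail (p : Int) (s : String) : List (List (List Int) × String) → List (List (List Int) × String)
  | [] => []
  | x :: xs => (pvRow p (pvTop x - 10), s) :: pvTail (pvTop x) (PySem.Str.lower x.2) xs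

-- the same rows after the final 2200 patch
def pvCore (p : Int) (s : String) : List (List (List Int) × String) → List (List (List Int) × String)
  | [] => []
  | x :: xs => if xs = [] then [(pvRow p 2200, s)]
               else (pvRow p (pvTop x - 10), s) :: pvCore (pvTop x) (PySem.Str.lower x.2) xs

theorem pvFoldA (r : List (List (List Int) × String)) :
    ∀ (nb : List (List (List Int) × String)) (ls : String) (p : Int), nb ≠ [] →
    (((nb.getLast?.getD ([], "")).1.getD (if nb.length = 1 then 0 else 3) []).getD 1 0) = p - 10 →
    (r.foldl pvStepA (nb, ls)).1 = nb ++ pvTail p ls r := by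
  induction r with
  | nil => intro nb ls p _ _; simp [pvTail]
  | cons x xs ih =>
    intro nb ls p hne hread
    have hlen : nb.length ≠ 0 := by simpa using hne
    have hstep : pvStepA (nb, ls) x = (nb ++ [(pvRow p (pvTop x - 10), ls)], PySem.Str.lower x.2) := by
      by_cases h1 : nb.length = 1
      · simp [pvStepA, h1] at hread ⊢
        rw [hread]; ring_nf
      · simp [pvStepA, h1, hne] at hread ⊢
        rw [hread]; ring_nf
    have hne' : nb ++ [(pvRow p (pvTop x - 10), ls)] ≠ [] := by simp
    have hlen' : (nb ++ [(pvRow p (pvTop x - 10), ls)]).length ≠ 1 := by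
      simp; omega
    have hread' :
        ((((nb ++ [(pvRow p (pvTop x - 10), ls)]).getLast?.getD ([], "")).1.getD
          (if (nb ++ [(pvRow p (pvTop x - 10), ls)]).length = 1 then 0 else 3) []).getD 1 0)
          = pvTop x - 10 := by
      simp [pvRow, hne]
    have := ih (nb ++ [(pvRow p (pvTop x - 10), ls)]) (PySem.Str.lower x.2) (pvTop x) hne' hread'
    simp only [List.foldl_cons, hstep, this, pvTail, List.append_assoc, List.cons_append,
      List.nil_append]

theorem pvPatch_concat (nb : List (List (List Int) × String)) (e : (List (List Int) × String)) :
    pvPatchA (nb ++ [e]) =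
      nb ++ [((e.1.modify 3 (fun p => p.set 1 2200)).modify 2 (fun p => p.set 1 2200), e.2)] := by
  simp [pvPatchA]

theorem pvRow_patch (a b : Int) :
    ((pvRow a b).modify 3 (fun p => p.set 1 2200)).modify 2 (fun p => p.set 1 2200) = pvRow a 2200 := by
  simp [pvRow, List.modify, List.set]

theorem pvPatch_tail (r : List (List (List Int) × String)) :
    ∀ (nb : List (List (List Int) × String)) (p : Int) (s : String), r ≠ [] →
    pvPatchA (nb ++ pvTail p s r) = nb ++ pvCore p s r := by
  induction r with
  | nil => intro _ _ _ h; exact absurd rfl h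
  | cons x xs ih =>
    intro nb p s _
    by_cases hxs : xs = []
    · subst hxs
      simp only [pvTail]
      rw [pvPatch_concat, pvRow_patch]
      simp [pvCore]
    · have := ih (nb ++ [(pvRow p (pvTop x - 10), s)]) (pvTop x) (PySem.Str.lower x.2) hxs
      simp only [pvTail, pvCore, if_neg hxs]
      rw [show nb ++ ((pvRow p (pvTop x - 10), s) :: pvTail (pvTop x) (PySem.Str.lower x.2) xs)
            = (nb ++ [(pvRow p (pvTop x - 10), s)]) ++ pvTail (pvTop x) (PySem.Str.lower x.2) xs by
          simp]
      rw [this]; simp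

-- B's zipped tail equals pvCore
theorem pvZip_tail (r : List (List (List Int) × String)) :
    ∀ (p : Int) (s : String), r ≠ [] →
    ((((p :: (r.map pvTop).dropLast).zip ((r.map (fun x => pvTop x - 10)).dropLast ++ [2200])).zip
        (s :: r.dropLast.map (fun b => PySem.Str.lower b.2))).map
      (fun q => (pvRow q.1.1 q.1.2, q.2))) = pvCore p s r := by
  induction r with
  | nil => intro _ _ h; exact absurd rfl h
  | cons x xs ih =>
    intro p s _
    by_cases hxs : xs = []
    · subst hxs; simp [pvCore]
    · obtain ⟨y, ys, rfl⟩ := List.exists_cons_of_ne_nil hxs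
      have := ih (pvTop x) (PySem.Str.lower x.2) hxs
      simp only [List.map_cons, List.dropLast_cons₂, pvCore, if_neg hxs] at this ⊢
      rw [← this]
      simp [List.zip]

theorem createNormalBounds_spec : Claim_equal_createNormalBounds := by
  intro box _ hpre
  obtain ⟨hne, _⟩ := hpre
  obtain ⟨x, rest, rfl⟩ := List.exists_cons_of_ne_nil hne
  have hstep0 : pvStepA ([], "Personal Info") x
      = ([(pvRow (pvTop x - 10) 0, "Personal Info")], PySem.Str.lower x.2) := by
    simp [pvStepA]
  have hread0 :
      (((([(pvRow (pvTop x - 10) 0, "Personal Info")]).getLast?.getD ([], "")).1.getD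
        (if ([(pvRow (pvTop x - 10) 0, "Personal Info")] : List _).length = 1 then 0 else 3) []).getD 1 0)
        = pvTop x - 10 := by
    simp [pvRow]
  have hfold := pvFoldA rest [(pvRow (pvTop x - 10) 0, "Personal Info")] (PySem.Str.lower x.2)
    (pvTop x) (by simp) hread0
  show createNormalBounds (x :: rest) = createNormalBounds_alt (x :: rest)
  by_cases hrest : rest = []
  · subst hrest
    simp only [createNormalBounds, List.foldl_cons, List.foldl_nil, hstep0]
    rw [show ([(pvRow (pvTop x - 10) 0, "Personal Info")] : List _)
          = [] ++ [(pvRow (pvTop x - 10) 0, "Personal Info")] by simp, pvPatch_concat]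
    simp only [pvRow_patch, List.nil_append]
    simp [createNormalBounds_alt, pvRow]
  · simp only [createNormalBounds, List.foldl_cons, hstep0, hfold]
    rw [pvPatch_tail rest _ (pvTop x) (PySem.Str.lower x.2) hrest]
    -- now the B side
    obtain ⟨y, ys, rfl⟩ := List.exists_cons_of_ne_nil hrest
    have hz := pvZip_tail (y :: ys) (pvTop x) (PySem.Str.lower x.2) hrest
    simp only [createNormalBounds_alt, List.map_cons, List.headI, List.dropLast_cons₂,
      List.tail_cons] at *
    rw [← hz]
    simp [List.zip]
    simp only [Function.comp_def]
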